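-- pv_equiv track=rewrite | github.com/aerann/3XB3-Final-Lab | broken_station_problem.py | bsp_solution
-- ===== SOURCE A (Python) =====
-- def bsp_solution(L, m):
--     n = len(L)
--
--     # Sort the list in ascending order
--     L.sort()
--
--     # Initialize a 2D array to store optimal solutions to subproblems
--     dp = [[0] * (m + 1) for _ in range(n + 1)]
--
--     # Populate the dynamic programming table
--     for i in range(1, n + 1):
--         for j in range(1, m + 1):
--             # Optimal solution considering removing j elements up to index i
--             dp[i][j] = max(dp[i - 1][j], L[i - 1] - L[i - 2] + dp[i - 2][j - 1])
--
--     # Reconstruct the solution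
--     solution = []
--     i, j = n, m
--     while i > 0 and j > 0:
--         # If the current element is included in the optimal solution
--         if dp[i][j] != dp[i - 1][j]:
--             solution.append(L[i - 1])
--             i -= 2
--             j -= 1
--         else:
--             i -= 1
--
--     return sorted(solution)
-- ===== SOURCE B (Python) =====
-- def bsp_solution(L, m):
--     # Top-down memoized recursion that returns (value, chosen-station chain)
--     # pairs directly, so there is no DP table fill and no backward
--     # reconstruction pass. Chains are shared cons cells (head, tail)/None.
--     # Like A, this sorts L in place (observable mutation of the argument).
--     L.sort()
--     n = len(L)
--     memo = {}
--
--     def best(i, j):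
--         # best coverage using the first i sorted stations with j removals left,
--         # together with the removed stations as a cons chain
--         if i < 2 or j <= 0:
--             return (0, None)
--         key = (i, j)
--         if key in memo:
--             return memo[key]
--         skip_v, skip_c = best(i - 1, j)
--         rest_v, rest_c = best(i - 2, j - 1)
--         take_v = L[i - 1] - L[i - 2] + rest_v
--         if take_v > skip_v:
--             res = (take_v, (L[i - 1], rest_c))
--         else:
--             res = (skip_v, skip_c)
--         memo[key] = res
--         return res
--
--     chain = best(n, m)[1]
--     solution = []
--     while chain is not None:
--         solution.append(chain[0])
--         chain = chain[1]
--     return sorted(solution)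
-- ===== Notes on version B (the rewrite author's own statement) =====
-- stated objective: alternative
-- what changed: B replaces A's bottom-up table fill plus separate backward reconstruction loop with a single top-down memoized recursion best(i,j) that returns (value, chosen-station cons chain) pairs, so the solution is built during the recursion and no table or backtracking pass exists.
import Mathlib
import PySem

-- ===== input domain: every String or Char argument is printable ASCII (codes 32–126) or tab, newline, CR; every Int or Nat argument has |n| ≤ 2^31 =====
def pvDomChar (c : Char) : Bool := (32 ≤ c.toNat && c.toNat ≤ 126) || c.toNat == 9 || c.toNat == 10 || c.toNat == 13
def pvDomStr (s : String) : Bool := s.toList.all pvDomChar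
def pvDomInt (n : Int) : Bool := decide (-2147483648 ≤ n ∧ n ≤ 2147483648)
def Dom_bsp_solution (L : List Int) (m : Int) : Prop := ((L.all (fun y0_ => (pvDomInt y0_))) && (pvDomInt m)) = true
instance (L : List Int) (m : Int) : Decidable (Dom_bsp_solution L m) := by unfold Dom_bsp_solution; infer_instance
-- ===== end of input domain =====

-- B replaces A's bottom-up DP table + backward reconstruction loop by a single
-- top-down memoized recursion returning (value, chosen stations) pairs
-- (objective: alternative). Both Pythons sort L in place; the equivalence proved
-- here is about the return value (B performs the same mutation).

-- ===== PORT A =====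
-- dp[i][j] read (Python raises only out of range; all reads here are in range,
-- incl. the dp[-1]/L[-1] negative-index reads at i == 1, which pyGetD handles)
def pvGetA (dp : List (List Int)) (i j : Int) : Int :=
  PySem.List.pyGetD (PySem.List.pyGetD dp i []) j 0

-- dp[i][j] = v (in-place row assignment; i, j are nonnegative and in range here)
def pvSetA (dp : List (List Int)) (i j : Int) (v : Int) : List (List Int) :=
  dp.set i.toNat ((dp.getD i.toNat []).set j.toNat v)

-- the reconstruction while-loop of A
def pvReconA (dp : List (List Int)) (Ls : List Int) (i j : Int) (sol : List Int) : List Int :=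
  if 0 < i ∧ 0 < j then
    if pvGetA dp i j ≠ pvGetA dp (i-1) j then
      pvReconA dp Ls (i-2) (j-1) (sol ++ [PySem.List.pyGetD Ls (i-1) 0])
    else pvReconA dp Ls (i-1) j sol
  else sol
termination_by i.toNat
decreasing_by all_goals omega

def bsp_solution (L : List Int) (m : Int) : List Int :=
  let n : Int := (L.length : Int)
  let Ls : List Int := PySem.List.sorted L (fun x => x) false
  let dp0 : List (List Int) := List.replicate (n+1).toNat (List.replicate (m+1).toNat 0)
  let dp := (PySem.List.pyRange 1 (n+1) 1).foldl (fun dp i =>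
      (PySem.List.pyRange 1 (m+1) 1).foldl (fun dp j =>
        pvSetA dp i j (max (pvGetA dp (i-1) j)
          (PySem.List.pyGetD Ls (i-1) 0 - PySem.List.pyGetD Ls (i-2) 0 + pvGetA dp (i-2) (j-1)))) dp) dp0
  PySem.List.sorted (pvReconA dp Ls n m []) (fun x => x) false

-- ===== PORT B =====
-- Source B's cons chains ((head, tail) / None) are represented as List Int
-- (x :: c / []), an exact correspondence; the memo dict is threaded through
-- the memoized recursion best(i, j) of Source B
def pvBestPort (Ls : List Int) (i j : Int)
    (memo : PySem.Dict (Int × Int) (Int × List Int)) :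
    (Int × List Int) × PySem.Dict (Int × Int) (Int × List Int) :=
  if i < 2 ∨ j ≤ 0 then ((0, []), memo)
  else
    match memo.get? (i, j) with
    | some v => (v, memo)
    | none =>
      let p := pvBestPort Ls (i-1) j memo
      let q := pvBestPort Ls (i-2) (j-1) p.2
      let take_v := PySem.List.pyGetD Ls (i-1) 0 - PySem.List.pyGetD Ls (i-2) 0 + q.1.1
      let res := if p.1.1 < take_v then (take_v, PySem.List.pyGetD Ls (i-1) 0 :: q.1.2) else p.1
      (res, q.2.insert (i, j) res)
termination_by i.toNat
decreasing_by all_goals omega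

-- the chain-unwinding while-loop of Source B
def pvChainToList : List Int → List Int → List Int
  | [], sol => sol
  | x :: c, sol => pvChainToList c (sol ++ [x])

def bsp_solution_alt (L : List Int) (m : Int) : List Int :=
  let Ls : List Int := PySem.List.sorted L (fun x => x) false
  let n : Int := (Ls.length : Int)
  PySem.List.sorted (pvChainToList (pvBestPort Ls n m PySem.Dict.empty).1.2 []) (fun x => x) false

-- ===== PRECONDITION & SPEC =====
def Spec_bsp_solution (L : List Int) (m : Int) (out : List Int) : Prop := out = bsp_solution_alt L m
instance (L : List Int) (m : Int) (out : List Int) : Decidable (Spec_bsp_solution L m out) := by unfold Spec_bsp_solution; infer_instance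

-- ===== CLAIM (what is proved, stated in full; the proofs are below) =====
def Claim_equal_bsp_solution : Prop := ∀ (L : List Int) (m : Int), Dom_bsp_solution L m → Spec_bsp_solution L m (bsp_solution L m)

-- ===== LEMMAS AND PROOFS =====

def pvF (Ls : List Int) : Nat → Nat → Int
  | 0, _ => 0
  | 1, _ => 0
  | _+2, 0 => 0
  | i+2, j+1 => max (pvF Ls (i+1) (j+1)) (Ls.getD (i+1) 0 - Ls.getD i 0 + pvF Ls i j)
termination_by i _ => i
theorem pvF_low {Ls : List Int} {i j : Nat} (h : i ≤ 1 ∨ j = 0) : pvF Ls i j = 0 := by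
  match i, j with
  | 0, _ => simp [pvF]
  | 1, _ => simp [pvF]
  | i+2, 0 => simp [pvF]
  | i+2, j+1 => omega
theorem pvF_succ (Ls : List Int) (i j : Nat) :
    pvF Ls (i+2) (j+1) = max (pvF Ls (i+1) (j+1)) (Ls.getD (i+1) 0 - Ls.getD i 0 + pvF Ls i j) := by
  simp [pvF]
theorem pvFoldRangeInd {α : Type} (P : Nat → α → Prop) (f : α → Int → α) (init : α) (a : Int) (k : Nat)
    (h0 : P 0 init) (hs : ∀ (t : Nat) (acc : α), t < k → P t acc → P (t+1) (f acc (a + t))) :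
    P k ((PySem.List.pyRange a (a + k) 1).foldl f init) := by
  induction k with
  | zero => simpa [PySem.List.pyRange_one] using h0
  | succ t ih =>
    have : a + ((t+1 : Nat) : Int) = (a + t) + 1 := by omega
    rw [this, PySem.List.pyRange_one_succ_right (by omega), List.foldl_append]
    exact hs t _ (by omega) (ih (fun u acc hu => hs u acc (by omega)))
theorem pvFoldRangeInd' {α : Type} (P : Nat → α → Prop) (f : α → Int → α) (init : α) (a b : Int)
    (h0 : P 0 init) (hs : ∀ (t : Nat) (acc : α), t < (b - a).toNat → P t acc → P (t+1) (f acc (a + t))) :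
    P (b - a).toNat ((PySem.List.pyRange a b 1).foldl f init) := by
  rcases le_or_gt b a with h | h
  · have h1 : (b - a).toNat = 0 := by omega
    have h2 : PySem.List.pyRange a b 1 = [] := by
      rw [PySem.List.pyRange_one]; simp [h1]
    rw [h1, h2]; exact h0
  · have := pvFoldRangeInd P f init a (b - a).toNat h0 hs
    rw [show a + ((b - a).toNat : Int) = b by omega] at this
    exact this

def pvCell (dp : List (List Int)) (r jj : Nat) : Int := (dp.getD r []).getD jj 0

theorem pvGetA_natCast (dp : List (List Int)) (r jj : Nat) :
    pvGetA dp (r : Int) (jj : Int) = pvCell dp r jj := by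
  simp [pvGetA, pvCell]

theorem pvGetD_set {α : Type} (l : List α) (p q : Nat) (v d : α) :
    (l.set p v).getD q d = if q = p ∧ p < l.length then v else l.getD q d := by
  simp only [List.getD_eq_getElem?_getD, List.getElem?_set]
  by_cases h1 : p = q
  · subst h1
    by_cases h2 : p < l.length <;> simp [h2]
  · have h2 : ¬ (q = p ∧ p < l.length) := fun h => h1 h.1.symm
    simp [h1, h2]

theorem pvRowLen_set (dp : List (List Int)) (i : Nat) (row : List Int) (r : Nat) :
    ((dp.set i row).getD r []).length = if r = i ∧ i < dp.length then row.length else (dp.getD r []).length := by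
  simp only [List.getD_eq_getElem?_getD, List.getElem?_set]
  by_cases h1 : i = r
  · subst h1
    by_cases h2 : i < dp.length <;> simp [h2]
  · have h2 : ¬ (r = i ∧ i < dp.length) := fun h => h1 h.1.symm
    simp [h1, h2]

theorem pvCell_set_row (dp : List (List Int)) (i : Nat) (row : List Int) (r jj : Nat) :
    pvCell (dp.set i row) r jj = if r = i ∧ i < dp.length then row.getD jj 0 else pvCell dp r jj := by
  simp only [pvCell, List.getD_eq_getElem?_getD, List.getElem?_set]
  by_cases h1 : i = r
  · subst h1
    by_cases h2 : i < dp.length <;> simp [h2]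
  · have h2 : ¬ (r = i ∧ i < dp.length) := fun h => h1 h.1.symm
    simp [h1, h2]

theorem pvInnerA (Ls : List Int) (m : Int) (i : Nat)
    (hi1 : 1 ≤ i) (hiN : i ≤ Ls.length)
    (hs : ∀ (h : Ls ≠ []), Ls.getD 0 0 ≤ Ls.getLast h)
    (dp : List (List Int))
    (hlen : dp.length = Ls.length + 1)
    (hrow : ∀ r, r < dp.length → (dp.getD r []).length = (m+1).toNat)
    (hlow : ∀ r, r < i → ∀ jj, jj < (m+1).toNat → pvCell dp r jj = pvF Ls r jj)
    (hhigh : ∀ r, i ≤ r → r < dp.length → ∀ jj, jj < (m+1).toNat → pvCell dp r jj = 0) :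
    ∀ dp', dp' = (PySem.List.pyRange 1 (m+1) 1).foldl (fun dp j =>
        pvSetA dp (i:Int) j (max (pvGetA dp ((i:Int)-1) j)
          (PySem.List.pyGetD Ls ((i:Int)-1) 0 - PySem.List.pyGetD Ls ((i:Int)-2) 0 + pvGetA dp ((i:Int)-2) (j-1)))) dp →
    dp'.length = Ls.length + 1 ∧
    (∀ r, r < dp'.length → (dp'.getD r []).length = (m+1).toNat) ∧
    (∀ r, r < i+1 → ∀ jj, jj < (m+1).toNat → pvCell dp' r jj = pvF Ls r jj) ∧
    (∀ r, i+1 ≤ r → r < dp'.length → ∀ jj, jj < (m+1).toNat → pvCell dp' r jj = 0) := by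
  intro dp' hdp'
  set N := Ls.length with hN
  -- invariant for the inner fold
  set P : Nat → List (List Int) → Prop := fun t d =>
    d.length = N + 1 ∧
    (∀ r, r < d.length → (d.getD r []).length = (m+1).toNat) ∧
    (∀ r, r < i → ∀ jj, jj < (m+1).toNat → pvCell d r jj = pvF Ls r jj) ∧
    (∀ r, i < r → r < d.length → ∀ jj, jj < (m+1).toNat → pvCell d r jj = 0) ∧
    (∀ jj, jj < (m+1).toNat → pvCell d i jj = if jj ≤ t then pvF Ls i jj else 0) with hP
  have main : P (m + 1 - 1).toNat dp' := by
    rw [hdp']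
    apply pvFoldRangeInd'
    · refine ⟨hlen, hrow, hlow, fun r hr1 hr2 jj hjj => hhigh r (by omega) hr2 jj hjj, ?_⟩
      intro jj hjj
      have h0 := hhigh i (le_refl i) (by omega) jj hjj
      rw [h0]
      split
      · next hle =>
        have : jj = 0 := by omega
        subst this
        exact (pvF_low (Or.inr rfl)).symm
      · rfl
    · rintro t d ht ⟨h1, h2, h3, h4, h5⟩
      have hm0 : 1 ≤ m := by omega
      have hM : (m+1).toNat = m.toNat + 1 := by omega
      have htM : t + 1 < (m+1).toNat := by omega
      have ej : (1:Int) + (t:Nat) = ((t+1:Nat):Int) := by omega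
      have ej1 : (1:Int) + (t:Nat) - 1 = ((t:Nat):Int) := by omega
      have e1 : (i:Int) - 1 = ((i-1:Nat):Int) := by omega
      have hr1 : pvGetA d ((i:Int) - 1) (1 + (t:Nat)) = pvF Ls (i-1) (t+1) := by
        rw [e1, ej, pvGetA_natCast]
        exact h3 (i-1) (by omega) (t+1) htM
      have hdne : d ≠ [] := by
        intro hc; rw [hc] at h1; simp at h1
      -- the value written at (i, t+1) equals pvF Ls i (t+1)
      have hv : max (pvGetA d ((i:Int)-1) (1 + (t:Nat)))
          (PySem.List.pyGetD Ls ((i:Int)-1) 0 - PySem.List.pyGetD Ls ((i:Int)-2) 0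
            + pvGetA d ((i:Int)-2) (1 + (t:Nat) - 1)) = pvF Ls i (t+1) := by
        rcases Nat.lt_or_ge 1 i with hi2 | hi2
        · -- i ≥ 2 : the genuine recurrence
          obtain ⟨q, rfl⟩ : ∃ q, i = q + 2 := ⟨i - 2, by omega⟩
          have e2 : ((q+2:Nat):Int) - 2 = ((q:Nat):Int) := by omega
          have e1' : ((q+2:Nat):Int) - 1 = ((q+1:Nat):Int) := by omega
          rw [hr1, e2, ej1, pvGetA_natCast, e1']
          rw [h3 q (by omega) t (by omega)]
          rw [PySem.List.pyGetD_natCast, PySem.List.pyGetD_natCast]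
          rw [pvF_succ]
          simp
        · -- i = 1 : Python's dp[-1]/L[-1] reads; the written value is 0
          have hieq : i = 1 := by omega
          subst hieq
          have hLne : Ls ≠ [] := by
            intro hc
            have : N = 0 := by rw [hN, hc]; rfl
            omega
          have eL1 : ((1:Nat):Int) - 1 = 0 := by norm_num
          have eL2 : ((1:Nat):Int) - 2 = -1 := by norm_num
          rw [hr1, eL1, eL2, ej1]
          rw [PySem.List.pyGetD_zero, PySem.List.pyGetD_neg_one Ls 0 hLne]
          have hread : pvGetA d (-1) ((t:Nat):Int) = 0 := by
            unfold pvGetA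
            rw [PySem.List.pyGetD_neg_one d [] hdne]
            have hlast : d.getLast hdne = d.getD N [] := by
              rw [List.getLast_eq_getElem]
              simp [List.getD_eq_getElem?_getD, h1]
            rw [hlast, PySem.List.pyGetD_natCast]
            rcases Nat.lt_or_ge 1 N with hN2 | hN2
            · exact h4 N hN2 (by omega) t (by omega)
            · have hNeq : N = 1 := by omega
              have h5' := h5 t (by omega)
              simp only [pvCell] at h5'
              rw [hNeq, h5', if_pos (le_refl t)]
              exact pvF_low (Or.inl (by omega))
          rw [hread]
          have hhl : Ls.getD 0 0 ≤ Ls.getLast hLne := hs hLne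
          have z0 : pvF Ls (1-1) (t+1) = 0 := pvF_low (Or.inl (by omega))
          have z1 : pvF Ls 1 (t+1) = 0 := pvF_low (Or.inl (by omega))
          rw [z0, z1, add_zero]
          exact max_eq_left (by omega)
      -- the write
      rw [hv]
      have hitn : ((i:Int)).toNat = i := by omega
      have hjtn : ((1:Int) + (t:Nat)).toNat = t + 1 := by omega
      have hset : pvSetA d (i:Int) (1 + (t:Nat)) (pvF Ls i (t+1))
          = d.set i ((d.getD i []).set (t+1) (pvF Ls i (t+1))) := by
        unfold pvSetA
        rw [hitn, hjtn]
      rw [hset]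
      have hidlen : i < d.length := by omega
      have hrowlen : (d.getD i []).length = (m+1).toNat := h2 i hidlen
      refine ⟨by simp [h1], ?_, ?_, ?_, ?_⟩
      · intro r hr
        rw [pvRowLen_set]
        split
        · rw [List.length_set]; exact hrowlen
        · exact h2 r (by simpa using hr)
      · intro r hr jj hjj
        rw [pvCell_set_row]
        have : ¬ (r = i ∧ i < d.length) := fun hc => by omega
        rw [if_neg this]
        exact h3 r hr jj hjj
      · intro r hr hrlen jj hjj
        rw [pvCell_set_row]
        have : ¬ (r = i ∧ i < d.length) := fun hc => by omega
        rw [if_neg this]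
        exact h4 r (by omega) (by simpa using hrlen) jj hjj
      · intro jj hjj
        rw [pvCell_set_row, if_pos ⟨rfl, hidlen⟩, pvGetD_set]
        by_cases hjt : jj = t + 1
        · subst hjt
          rw [if_pos ⟨rfl, by omega⟩, if_pos (le_refl _)]
        · rw [if_neg (fun hc => hjt hc.1)]
          have h5' := h5 jj hjj
          simp only [pvCell] at h5'
          rw [h5']
          by_cases hle : jj ≤ t
          · rw [if_pos hle, if_pos (by omega)]
          · rw [if_neg hle, if_neg (by omega)]
  -- derive the stated conclusion from the invariant at m.toNat
  obtain ⟨g1, g2, g3, g4, g5⟩ := main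
  refine ⟨g1, g2, ?_, fun r hr hrl jj hjj => g4 r (by omega) hrl jj hjj⟩
  intro r hr jj hjj
  rcases Nat.lt_or_ge r i with hri | hri
  · exact g3 r hri jj hjj
  · have : r = i := by omega
    subst this
    rw [g5 jj hjj, if_pos (by omega)]

theorem pvTableA (L : List Int) (m : Int)
    (Ls : List Int) (hLs : Ls = PySem.List.sorted L (fun x => x) false)
    (hs : ∀ (h : Ls ≠ []), Ls.getD 0 0 ≤ Ls.getLast h) :
    ∀ dpF, dpF = (PySem.List.pyRange 1 ((L.length:Int)+1) 1).foldl (fun dp i =>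
      (PySem.List.pyRange 1 (m+1) 1).foldl (fun dp j =>
        pvSetA dp i j (max (pvGetA dp (i-1) j)
          (PySem.List.pyGetD Ls (i-1) 0 - PySem.List.pyGetD Ls (i-2) 0 + pvGetA dp (i-2) (j-1)))) dp)
      (List.replicate ((L.length:Int)+1).toNat (List.replicate (m+1).toNat 0)) →
    ∀ r, r ≤ Ls.length → ∀ jj, jj < (m+1).toNat → pvCell dpF r jj = pvF Ls r jj := by
  intro dpF hdpF
  have hNL : Ls.length = L.length := by rw [hLs, PySem.List.length_sorted]
  set N := Ls.length with hN
  set P : Nat → List (List Int) → Prop := fun k d =>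
    d.length = N + 1 ∧
    (∀ r, r < d.length → (d.getD r []).length = (m+1).toNat) ∧
    (∀ r, r < k+1 → ∀ jj, jj < (m+1).toNat → pvCell d r jj = pvF Ls r jj) ∧
    (∀ r, k+1 ≤ r → r < d.length → ∀ jj, jj < (m+1).toNat → pvCell d r jj = 0) with hP
  have htn : (((L.length:Int)+1).toNat) = N + 1 := by omega
  have main : P ((L.length:Int) + 1 - 1).toNat dpF := by
    rw [hdpF]
    apply pvFoldRangeInd'
    · refine ⟨by simp [htn], ?_, ?_, ?_⟩
      · intro r hr
        simp only [List.length_replicate, htn] at hr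
        rw [List.getD_replicate _ (by omega)]
        simp
      · intro r hr jj hjj
        have : r = 0 := by omega
        subst this
        simp only [pvCell]
        rw [List.getD_replicate _ (by omega), List.getD_replicate _ (by omega)]
        exact (pvF_low (Or.inl (by omega))).symm
      · intro r hr hrl jj hjj
        simp only [pvCell, List.length_replicate, htn] at hrl ⊢
        rw [List.getD_replicate _ (by omega), List.getD_replicate _ (by omega)]
    · rintro t d ht ⟨h1, h2, h3, h4⟩
      have htN : t < N := by omega
      have e : (1:Int) + (t:Nat) = ((t+1:Nat):Int) := by omega
      rw [e]
      have := pvInnerA Ls m (t+1) (by omega) (by omega) hs d h1 h2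
        (fun r hr jj hjj => h3 r (by omega) jj hjj)
        (fun r hr hrl jj hjj => h4 r (by omega) hrl jj hjj)
        _ rfl
      obtain ⟨g1, g2, g3, g4⟩ := this
      exact ⟨g1, g2, fun r hr jj hjj => g3 r (by omega) jj hjj,
        fun r hr hrl jj hjj => g4 r (by omega) hrl jj hjj⟩
  obtain ⟨g1, g2, g3, g4⟩ := main
  intro r hr jj hjj
  exact g3 r (by omega) jj hjj

-- B-side: the pure (memo-free) value of the recursion best(i, j)
def pvS (Ls : List Int) (i j : Int) : Int × List Int :=
  if i < 2 ∨ j ≤ 0 then (0, [])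
  else
    let p := pvS Ls (i-1) j
    let q := pvS Ls (i-2) (j-1)
    let take_v := PySem.List.pyGetD Ls (i-1) 0 - PySem.List.pyGetD Ls (i-2) 0 + q.1
    if p.1 < take_v then (take_v, PySem.List.pyGetD Ls (i-1) 0 :: q.2) else p
termination_by i.toNat
decreasing_by all_goals omega

-- a memo is good if every stored entry equals the pure value
def pvGood (Ls : List Int) (memo : PySem.Dict (Int × Int) (Int × List Int)) : Prop :=
  ∀ k v, memo.get? k = some v → v = pvS Ls k.1 k.2

theorem pvBest_good (Ls : List Int) : ∀ (N : Nat) (i j : Int)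
    (memo : PySem.Dict (Int × Int) (Int × List Int)), i.toNat ≤ N → pvGood Ls memo →
    (pvBestPort Ls i j memo).1 = pvS Ls i j ∧ pvGood Ls (pvBestPort Ls i j memo).2 := by
  intro N
  induction N with
  | zero =>
    intro i j memo hk hg
    have hi : i < 2 := by omega
    rw [pvBestPort, pvS, if_pos (Or.inl hi), if_pos (Or.inl hi)]
    exact ⟨rfl, hg⟩
  | succ N ih =>
    intro i j memo hk hg
    rw [pvBestPort, pvS]
    by_cases hb : i < 2 ∨ j ≤ 0
    · rw [if_pos hb, if_pos hb]; exact ⟨rfl, hg⟩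
    · rw [if_neg hb, if_neg hb]
      cases hget : memo.get? (i, j) with
      | some v =>
        refine ⟨?_, hg⟩
        have := hg (i, j) v hget
        simp only at this
        rw [this, pvS, if_neg hb]
      | none =>
        obtain ⟨hp1, hp2⟩ := ih (i-1) j memo (by omega) hg
        obtain ⟨hq1, hq2⟩ := ih (i-2) (j-1) _ (by omega) hp2
        simp only [hp1, hq1]
        constructor
        · trivial
        · intro k v hkv
          rw [PySem.Dict.get?_insert] at hkv
          split at hkv
          · next hkeq =>
            subst hkeq
            simp only at hkv ⊢
            rw [pvS, if_neg hb]
            exact (Option.some_inj.mp hkv).symm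
          · exact hq2 k v hkv

theorem pvS_fst (Ls : List Int) : ∀ (N : Nat) (i j : Int), i.toNat ≤ N → 0 ≤ i →
    (pvS Ls i j).1 = pvF Ls i.toNat j.toNat := by
  intro N
  induction N with
  | zero =>
    intro i j hk h0
    have : i < 2 := by omega
    rw [pvS, if_pos (Or.inl this)]
    exact (pvF_low (Or.inl (by omega))).symm
  | succ N ih =>
    intro i j hk h0
    rw [pvS]
    by_cases hb : i < 2 ∨ j ≤ 0
    · rw [if_pos hb]
      rcases hb with hb | hb
      · exact (pvF_low (Or.inl (by omega))).symm
      · exact (pvF_low (Or.inr (by omega))).symm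
    · rw [if_neg hb]
      have hi2 : 2 ≤ i := by omega
      have hj1 : 1 ≤ j := by omega
      obtain ⟨q, hq⟩ : ∃ q : Nat, i.toNat = q + 2 := ⟨i.toNat - 2, by omega⟩
      obtain ⟨p, hp⟩ : ∃ p : Nat, j.toNat = p + 1 := ⟨j.toNat - 1, by omega⟩
      have e1 : i - 1 = ((q+1 : Nat) : Int) := by omega
      have e2 : i - 2 = ((q : Nat) : Int) := by omega
      have hv1 := ih (i-1) j (by omega) (by omega)
      have hv2 := ih (i-2) (j-1) (by omega) (by omega)
      have e3 : (i-1).toNat = q + 1 := by omega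
      have e4 : (i-2).toNat = q := by omega
      have e5 : (j-1).toNat = p := by omega
      rw [e3] at hv1; rw [e4, e5] at hv2
      rw [hp] at hv1
      rw [hq, hp, pvF_succ]
      rw [e1] at hv1
      rw [e2] at hv2
      rw [e1, e2, PySem.List.pyGetD_natCast, PySem.List.pyGetD_natCast]
      simp only [hv1, hv2]
      split
      · next hlt => omega
      · next hlt => rw [hv1]; omega

theorem pvReconA_eq (dp : List (List Int)) (Ls : List Int) (nI m : Int)
    (hn : nI = (Ls.length : Int))
    (hcell : ∀ r, r ≤ Ls.length → ∀ jj, jj < (m+1).toNat → pvCell dp r jj = pvF Ls r jj) :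
    ∀ (N : Nat) (i j : Int) (sol : List Int), i.toNat ≤ N → i ≤ nI → j ≤ m →
      pvReconA dp Ls i j sol = sol ++ (pvS Ls i j).2 := by
  intro N
  induction N with
  | zero =>
    intro i j sol hk hi hj
    rw [pvReconA, if_neg (by omega), pvS, if_pos (by omega)]
    simp
  | succ N ih =>
    intro i j sol hk hi hj
    rw [pvReconA]
    by_cases hb : 0 < i ∧ 0 < j
    · rw [if_pos hb]
      have hjm : j.toNat < (m+1).toNat := by omega
      have hcA : pvGetA dp i j = pvF Ls i.toNat j.toNat := by
        rw [show i = ((i.toNat : Nat) : Int) by omega, show j = ((j.toNat : Nat) : Int) by omega,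
          pvGetA_natCast]
        exact hcell i.toNat (by omega) j.toNat hjm
      have hcA' : pvGetA dp (i-1) j = pvF Ls (i-1).toNat j.toNat := by
        rw [show i - 1 = (((i-1).toNat : Nat) : Int) by omega, show j = ((j.toNat : Nat) : Int) by omega,
          pvGetA_natCast]
        exact hcell (i-1).toNat (by omega) j.toNat hjm
      rcases Nat.lt_or_ge i.toNat 2 with hi2 | hi2
      · -- i = 1: dp[1][j] = 0 = dp[0][j], so A skips; pvS i j = (0, [])
        have hieq : i = 1 := by omega
        subst hieq
        have hz : pvGetA dp 1 j = pvGetA dp (1-1) j := by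
          rw [hcA, hcA']
          rw [pvF_low (Or.inl (by omega)), pvF_low (Or.inl (by omega))]
        rw [if_neg (by simp [hz])]
        rw [ih (1-1) j sol (by omega) (by omega) hj]
        rw [pvS, if_pos (by norm_num), pvS, if_pos (by norm_num)]
      · -- i ≥ 2
        obtain ⟨q, hq⟩ : ∃ q : Nat, i.toNat = q + 2 := ⟨i.toNat - 2, by omega⟩
        obtain ⟨p, hp⟩ : ∃ p : Nat, j.toNat = p + 1 := ⟨j.toNat - 1, by omega⟩
        have e1 : (i-1).toNat = q + 1 := by omega
        have hs1 := pvS_fst Ls (q+1) (i-1) j (by omega) (by omega)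
        have hs2 := pvS_fst Ls q (i-2) (j-1) (by omega) (by omega)
        rw [e1, hp] at hs1
        rw [show (i-2).toNat = q by omega, show (j-1).toNat = p by omega] at hs2
        have egt1 : PySem.List.pyGetD Ls (i-1) 0 = Ls.getD (q+1) 0 := by
          rw [show i - 1 = ((q+1 : Nat) : Int) by omega, PySem.List.pyGetD_natCast]
        have egt2 : PySem.List.pyGetD Ls (i-2) 0 = Ls.getD q 0 := by
          rw [show i - 2 = ((q : Nat) : Int) by omega, PySem.List.pyGetD_natCast]
        have hFi : pvF Ls i.toNat j.toNat
            = max (pvF Ls (q+1) (p+1)) (Ls.getD (q+1) 0 - Ls.getD q 0 + pvF Ls q p) := by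
          rw [hq, hp, pvF_succ]
        have hcond : (pvGetA dp i j ≠ pvGetA dp (i-1) j)
            ↔ pvF Ls (q+1) (p+1) < Ls.getD (q+1) 0 - Ls.getD q 0 + pvF Ls q p := by
          rw [hcA, hcA', hFi, e1, hp]
          constructor
          · intro hne
            by_contra hle
            exact hne (by omega)
          · intro hlt
            omega
        have hpS : pvS Ls i j =
            (if (pvS Ls (i-1) j).1 < PySem.List.pyGetD Ls (i-1) 0 - PySem.List.pyGetD Ls (i-2) 0 + (pvS Ls (i-2) (j-1)).1
             then (PySem.List.pyGetD Ls (i-1) 0 - PySem.List.pyGetD Ls (i-2) 0 + (pvS Ls (i-2) (j-1)).1,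
                   PySem.List.pyGetD Ls (i-1) 0 :: (pvS Ls (i-2) (j-1)).2)
             else pvS Ls (i-1) j) := by
          rw [pvS, if_neg (by omega)]
        by_cases hne : pvGetA dp i j ≠ pvGetA dp (i-1) j
        · rw [if_pos hne]
          have hlt : pvF Ls (q+1) (p+1) < Ls.getD (q+1) 0 - Ls.getD q 0 + pvF Ls q p :=
            hcond.mp hne
          rw [ih (i-2) (j-1) _ (by omega) (by omega) (by omega)]
          rw [hpS, if_pos (by rw [hs1, hs2, egt1, egt2]; omega)]
          simp
        · rw [if_neg hne]
          have hge : ¬ pvF Ls (q+1) (p+1) < Ls.getD (q+1) 0 - Ls.getD q 0 + pvF Ls q p :=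
            fun hc => hne (hcond.mpr hc)
          rw [ih (i-1) j sol (by omega) (by omega) hj]
          rw [hpS, if_neg (by rw [hs1, hs2, egt1, egt2]; omega)]
    · rw [if_neg hb, pvS, if_pos (by omega)]
      simp

theorem pvChainToList_eq : ∀ (c sol : List Int), pvChainToList c sol = sol ++ c := by
  intro c
  induction c with
  | nil => intro sol; simp [pvChainToList]
  | cons x c ih => intro sol; rw [pvChainToList, ih]; simp

theorem bsp_solution_spec' : ∀ (L : List Int) (m : Int), bsp_solution L m = bsp_solution_alt L m := by
  intro L m
  simp only [bsp_solution, bsp_solution_alt]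
  rw [show ((PySem.List.sorted L (fun x => x) false).length : Int) = (L.length : Int) by
    rw [PySem.List.length_sorted]]
  set Ls := PySem.List.sorted L (fun x => x) false with hLs
  have hNL : Ls.length = L.length := by rw [hLs, PySem.List.length_sorted]
  have hs : ∀ (h : Ls ≠ []), Ls.getD 0 0 ≤ Ls.getLast h := by
    intro h
    have hpos : 0 < Ls.length := List.length_pos_iff.mpr h
    have := PySem.List.sorted_id_getElem_mono (xs := L) (p := 0) (q := Ls.length - 1)
      (by omega) (by rw [PySem.List.length_sorted]; omega)
    rw [List.getLast_eq_getElem, List.getD_eq_getElem?_getD,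
      List.getElem?_eq_getElem (by omega)]
    simpa using this
  have hA := pvTableA L m Ls hLs hs _ rfl
  apply congrArg (fun l => PySem.List.sorted l (fun x => x) false)
  have hB := pvBest_good Ls ((L.length : Int)).toNat (L.length : Int) m PySem.Dict.empty
    (le_refl _) (by intro k v hkv; rw [PySem.Dict.get?_empty] at hkv; cases hkv)
  rw [hB.1, pvChainToList_eq]
  have := pvReconA_eq _ Ls (L.length : Int) m (by rw [hNL]) hA
    ((L.length : Int)).toNat (L.length : Int) m [] (le_refl _) (le_refl _) (le_refl m)
  rw [this]

-- ===== VERDICT (by name: the statement is the Claim_ definition above) =====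
theorem bsp_solution_spec : Claim_equal_bsp_solution := by
  intro L m _
  unfold Spec_bsp_solution
  exact bsp_solution_spec' L m
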